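-- pv_equiv track=rewrite | github.com/rubbishdq/signal_detection | sd_python_project/dataset.py | zip_dataset
-- ===== SOURCE A (Python) =====
-- def zip_dataset(files, mods):
--     file_dict = {}
--     for k in range(len(files)):
--         if mods[k] in file_dict.keys():
--             file_dict[mods[k]].append(files[k])
--         else:
--             file_dict[mods[k]] = [files[k]]
--     return file_dict
-- ===== SOURCE B (Python) =====
-- def zip_dataset(files, mods):
--     n = len(files)
--     keys = list(dict.fromkeys(mods[k] for k in range(n)))
--     return {m: [files[k] for k in range(n) if mods[k] == m] for m in keys}
-- ===== Notes on version B (the rewrite author's own statement) =====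
-- stated objective: alternative
-- what changed: Replaces A's single accumulating dict-building pass with a key-enumeration (ordered dedup of the first len(files) mods) followed by one filtered scan of the files per key.
import Mathlib
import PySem

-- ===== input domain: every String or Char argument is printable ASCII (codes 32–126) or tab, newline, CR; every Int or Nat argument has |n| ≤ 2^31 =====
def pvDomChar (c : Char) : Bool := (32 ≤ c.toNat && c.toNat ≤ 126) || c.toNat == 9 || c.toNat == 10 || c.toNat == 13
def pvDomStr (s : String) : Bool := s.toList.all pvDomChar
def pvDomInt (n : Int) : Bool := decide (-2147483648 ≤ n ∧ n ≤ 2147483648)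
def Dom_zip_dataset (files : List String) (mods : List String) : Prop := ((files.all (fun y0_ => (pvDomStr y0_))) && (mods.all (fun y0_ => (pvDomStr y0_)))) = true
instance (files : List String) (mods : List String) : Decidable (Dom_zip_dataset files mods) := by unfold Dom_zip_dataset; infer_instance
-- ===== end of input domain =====

-- B replaces A's single accumulating dict-building pass by an ordered key enumeration
-- followed by one filtered scan per key (alternative decomposition, not faster).

-- ===== PORT A =====
-- single pass: for k in range(len(files)): append files[k] under key mods[k]
def zip_dataset (files : List String) (mods : List String) : List (String × List String) :=
  ((PySem.List.pyRange 0 (PySem.List.len files) 1).foldl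
    (fun d k =>
      let m := PySem.List.pyGetD mods k ""
      if d.contains m then d.modify m [] (fun l => l ++ [PySem.List.pyGetD files k ""])
      else d.insert m [PySem.List.pyGetD files k ""])
    PySem.Dict.empty).items

-- ===== PORT B =====
-- keys = list(dict.fromkeys(mods[k] for k in range(n))); then one filtered scan per key
def zip_dataset_alt (files : List String) (mods : List String) : List (String × List String) :=
  let n : Int := PySem.List.len files
  let keys := PySem.List.dedup ((PySem.List.pyRange 0 n 1).map (fun k => PySem.List.pyGetD mods k ""))
  keys.map (fun m =>
    (m, ((PySem.List.pyRange 0 n 1).filter (fun k => PySem.List.pyGetD mods k "" == m)).map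
          (fun k => PySem.List.pyGetD files k "")))

-- ===== PRECONDITION & SPEC =====
-- Pre_ excludes exactly the inputs with len(mods) < len(files), where Python A raises IndexError at mods[k].
def Pre_zip_dataset (files : List String) (mods : List String) : Prop :=
  files.length ≤ mods.length
instance (files : List String) (mods : List String) : Decidable (Pre_zip_dataset files mods) := by unfold Pre_zip_dataset; infer_instance

def pvWitness_zip_dataset : List String × List String := (["a.dat", "b.dat", "c.dat"], ["qam", "psk", "qam"])

def Spec_zip_dataset (files : List String) (mods : List String) (out : List (String × List String)) : Prop := out = zip_dataset_alt files mods
instance (files : List String) (mods : List String) (out : List (String × List String)) : Decidable (Spec_zip_dataset files mods out) := by unfold Spec_zip_dataset; infer_instance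

-- ===== CLAIM (what is proved, stated in full; the proofs are below) =====
def Claim_equal_zip_dataset : Prop := ∀ (files : List String) (mods : List String), Dom_zip_dataset files mods → Pre_zip_dataset files mods → Spec_zip_dataset files mods (zip_dataset files mods)

-- ===== LEMMAS AND PROOFS =====

-- reading the pair (mods[k], files[k]) for k in range(n) is zipping the length-n prefixes
theorem pv_range_pair_map {α β : Type} (f : List α) (m : List β) (da : α) (db : β)
    (n : Nat) (h1 : n ≤ f.length) (h2 : n ≤ m.length) :
    List.map (fun k : Nat => (PySem.List.pyGetD m (k : Int) db, PySem.List.pyGetD f (k : Int) da))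
        (List.range n)
      = (m.take n).zip (f.take n) := by
  induction n with
  | zero => simp
  | succ n ih =>
    have hn1 : n ≤ f.length := Nat.le_of_succ_le h1
    have hn2 : n ≤ m.length := Nat.le_of_succ_le h2
    rw [List.range_succ, List.map_append, ih hn1 hn2]
    have hf : f[n]? = some (f.getD n da) := by
      simp [List.getD, List.getElem?_eq_getElem (show n < f.length by omega)]
    have hm : m[n]? = some (m.getD n db) := by
      simp [List.getD, List.getElem?_eq_getElem (show n < m.length by omega)]
    rw [List.take_add_one, List.take_add_one, hf, hm,
        List.zip_append (by simp; omega)]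
    simp [PySem.List.pyGetD_natCast]

theorem pv_zip_dataset_eq (files : List String) (mods : List String)
    (h : files.length ≤ mods.length) :
    zip_dataset files mods = zip_dataset_alt files mods := by
  have hlen : PySem.List.len files = ((files.length : Nat) : Int) := by
    simp [PySem.List.len]
  simp only [zip_dataset, zip_dataset_alt, hlen, PySem.List.pyRange_zero_nat]
  set n := files.length with hn
  set P : List (String × String) := (mods.take n).zip (files.take n) with hP
  have hpair := pv_range_pair_map files mods "" "" n (le_refl n) h
  rw [← hP] at hpair
  -- A side: fold over range = grouping fold over P
  have hfoldA :
      List.foldl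
        (fun (d : PySem.Dict String (List String)) (k : Int) =>
          let m := PySem.List.pyGetD mods k ""
          if d.contains m then d.modify m [] (fun l => l ++ [PySem.List.pyGetD files k ""])
          else d.insert m [PySem.List.pyGetD files k ""])
        PySem.Dict.empty (List.map (fun k : Nat => (k : Int)) (List.range n))
      = List.foldl (fun d p => d.modify p.1 [] (fun l => l ++ [p.2])) PySem.Dict.empty P := by
    rw [List.foldl_map, ← hpair, List.foldl_map]
    apply PySem.List.foldl_congr_mem
    intro d k _
    by_cases hc : d.contains (PySem.List.pyGetD mods (k : Int) "")
    · simp only [hc, if_true]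
    · simp only [hc, Bool.false_eq_true, if_false, PySem.Dict.modify]
      rw [PySem.Dict.getD_of_not_contains d [] (by simpa using hc), List.nil_append]
  rw [hfoldA]
  -- B side: keys and per-key scans over range = over P
  have hmods : List.map (fun k : Nat => PySem.List.pyGetD mods (k : Int) "") (List.range n)
      = P.map Prod.fst := by
    have := congrArg (List.map Prod.fst) hpair
    rw [List.map_map] at this
    simpa [Function.comp_def] using this
  set D := List.foldl (fun d p => d.modify p.1 [] (fun l => l ++ [p.2])) PySem.Dict.empty P with hD
  have hnodup : D.keys.Nodup :=
    PySem.Dict.nodup_keys_foldl_modify_key P Prod.fst [] (fun _ p => (fun l => l ++ [p.2])) _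
      PySem.Dict.nodup_keys_empty
  have hkeys : D.keys = PySem.Set.ofList (P.map Prod.fst) := by
    rw [hD, PySem.Dict.keys_foldl_modify_key P Prod.fst [] (fun _ p => (fun l => l ++ [p.2]))]
    simp [PySem.Set.update_nil_left]
  rw [PySem.Dict.items_eq_map_keys D hnodup [], hkeys]
  rw [List.map_map]
  simp only [Function.comp_def]
  rw [hmods, PySem.List.dedup_eq_ofList]
  apply List.map_congr_left
  intro m hm
  have hval : D.getD m [] = (P.filter (fun p => p.1 == m)).map (fun p => p.2) := by
    rw [hD, PySem.Dict.getD_foldl_modify_append]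
    simp
  have hscan :
      List.map (fun k => PySem.List.pyGetD files k "")
        (List.filter (fun k => PySem.List.pyGetD mods k "" == m)
          (List.map (fun k : Nat => (k : Int)) (List.range n)))
      = (P.filter (fun p => p.1 == m)).map (fun p => p.2) := by
    rw [List.filter_map, List.map_map]
    have h2 : List.map
          (fun k : Nat => (PySem.List.pyGetD mods (k : Int) "", PySem.List.pyGetD files (k : Int) ""))
          ((List.range n).filter (fun k : Nat => PySem.List.pyGetD mods (k : Int) "" == m))
        = P.filter (fun p => p.1 == m) := by
      rw [← hpair, List.filter_map]
      congr 1
    have h3 := congrArg (List.map (fun p : String × String => p.2)) h2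
    rw [List.map_map] at h3
    simpa [Function.comp_def] using h3
  rw [hscan, hval]

-- ===== VERDICT (by name: the statement is the Claim_ definition above) =====
theorem zip_dataset_spec : Claim_equal_zip_dataset := by
  intro files mods _ hpre
  unfold Spec_zip_dataset
  exact pv_zip_dataset_eq files mods hpre
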